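-- pv_equiv track=rewrite | github.com/albert-1/nexbids | bisect_error.py | has_syntax_issue
-- ===== SOURCE A (Python) =====
-- def has_syntax_issue(entries_subset):
--     """Quick check: look for unclosed strings or braces in entries"""
--     code = "const CONTENT_T = {\n" + "".join(entries_subset) + "\n};\n"
--     depth = 0
--     in_str = False
--     str_ch = None
--     esc = False
--     for i, ch in enumerate(code):
--         if esc:
--             esc = False
--             continue
--         if ch == '\\':
--             esc = True
--             continue
--         if in_str:
--             if ch == str_ch:
--                 in_str = False
--         else:
--             if ch in ("'", '"'):
--                 in_str = True
--                 str_ch = ch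
--             elif ch == '{':
--                 depth += 1
--             elif ch == '}':
--                 depth -= 1
--     return depth != 0 or in_str
-- ===== SOURCE B (Python) =====
-- def has_syntax_issue(entries_subset):
--     """Quick check: look for unclosed strings or braces in entries"""
--     code = "const CONTENT_T = {\n" + "".join(entries_subset) + "\n};\n"
--     n = len(code)
--     i = 0
--     depth = 0
--     while i < n:
--         ch = code[i]
--         if ch == '\\':
--             i += 2
--         elif ch == "'" or ch == '"':
--             j = i + 1
--             while j < n:
--                 c = code[j]
--                 if c == '\\':
--                     j += 2
--                 elif c == ch:
--                     break
--                 else: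
--                     j += 1
--             if j >= n:
--                 return True  # unclosed string
--             i = j + 1
--         elif ch == '{':
--             depth += 1
--             i += 1
--         elif ch == '}':
--             depth -= 1
--             i += 1
--         else:
--             i += 1
--     return depth != 0
-- ===== Notes on version B (the rewrite author's own statement) =====
-- stated objective: alternative
-- what changed: Replaces A's four-flag single-pass state machine (esc/in_str/str_ch/depth updated per character) with an index-based outer loop that skips escape pairs and, on a quote, runs a dedicated inner scan to the matching close quote (returning True early if none), tracking only the brace depth outside strings.
import Mathlib
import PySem

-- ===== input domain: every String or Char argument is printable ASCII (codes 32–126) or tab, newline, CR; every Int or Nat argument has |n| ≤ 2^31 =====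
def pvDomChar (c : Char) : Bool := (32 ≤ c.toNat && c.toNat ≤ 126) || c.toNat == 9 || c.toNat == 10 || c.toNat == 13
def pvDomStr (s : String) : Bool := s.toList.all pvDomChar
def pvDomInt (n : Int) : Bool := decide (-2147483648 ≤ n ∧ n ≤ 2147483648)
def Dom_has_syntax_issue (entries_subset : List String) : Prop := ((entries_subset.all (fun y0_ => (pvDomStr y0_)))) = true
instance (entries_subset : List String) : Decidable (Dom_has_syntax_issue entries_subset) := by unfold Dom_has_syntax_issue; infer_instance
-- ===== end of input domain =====

-- B restructures A's per-character four-flag state machine into an outer escape/brace loop with an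
-- inner scan that consumes each string literal to its closing quote (alternative decomposition, same cost).

-- ===== PORT A =====
-- one step of A's `for ch in code` loop; state = (depth, in_str, str_ch, esc)
def pvStepA (st : Int × Bool × Option Char × Bool) (ch : Char) : Int × Bool × Option Char × Bool :=
  match st with
  | (depth, in_str, str_ch, esc) =>
    if esc then (depth, in_str, str_ch, false)
    else if ch = '\\' then (depth, in_str, str_ch, true)
    else if in_str then
      (if some ch = str_ch then (depth, false, str_ch, false) else (depth, in_str, str_ch, false))
    else if ch = '\'' ∨ ch = '"' then (depth, true, some ch, false)
    else if ch = '{' then (depth + 1, in_str, str_ch, false)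
    else if ch = '}' then (depth - 1, in_str, str_ch, false)
    else (depth, in_str, str_ch, false)

def has_syntax_issue (entries_subset : List String) : Bool :=
  let code := "const CONTENT_T = {\n" ++ String.join entries_subset ++ "\n};\n"
  let st := code.toList.foldl pvStepA (0, false, none, false)
  decide (st.1 ≠ 0) || st.2.1

-- ===== PORT B =====
-- inner while loop: consume chars (skipping backslash pairs) until the quote q closes;
-- `none` = reached end of code unclosed, `some r` = remainder after the closing quote.
def pvScanStr (q : Char) : List Char → Option (List Char)
  | [] => none
  | c :: rest =>
    if c = '\\' then
      match rest with
      | [] => none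
      | _ :: r => pvScanStr q r
    else if c = q then some rest else pvScanStr q rest

-- termination measure for the outer loop (cited by its decreasing_by)
theorem pvScanStr_length (q : Char) : ∀ (l r : List Char), pvScanStr q l = some r → r.length < l.length := by
  intro l
  induction l using pvScanStr.induct q with
  | case1 => intro r h; simp [pvScanStr] at h
  | case2 => intro r h; simp [pvScanStr] at h
  | case3 head rr ih =>
    intro r h
    simp only [pvScanStr, if_pos] at h
    have := ih r h; simp only [List.length_cons]; omega
  | case4 rest hq =>
    intro r h
    rw [pvScanStr.eq_def] at h
    simp [hq] at h
    subst h
    simp only [List.length_cons]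
    omega
  | case5 c rest hc hq ih =>
    intro r h
    rw [pvScanStr.eq_def] at h
    simp only [if_neg hc, if_neg hq] at h
    have := ih r h; simp only [List.length_cons]; omega

-- outer while loop over the remaining characters, carrying only the brace depth
def pvOuter : List Char → Int → Bool
  | [], depth => decide (depth ≠ 0)
  | ch :: rest, depth =>
    if ch = '\\' then pvOuter (rest.drop 1) depth
    else if ch = '\'' ∨ ch = '"' then
      match h : pvScanStr ch rest with
      | none => true
      | some r => pvOuter r depth
    else if ch = '{' then pvOuter rest (depth + 1)
    else if ch = '}' then pvOuter rest (depth - 1)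
    else pvOuter rest depth
termination_by l _ => l.length
decreasing_by
  all_goals simp only [List.length_cons, List.length_drop]
  all_goals try omega
  have := pvScanStr_length ch rest r h; omega

def has_syntax_issue_alt (entries_subset : List String) : Bool :=
  let code := "const CONTENT_T = {\n" ++ String.join entries_subset ++ "\n};\n"
  pvOuter code.toList 0

-- ===== PRECONDITION & SPEC =====
def Spec_has_syntax_issue (entries_subset : List String) (out : Bool) : Prop := out = has_syntax_issue_alt entries_subset
instance (entries_subset : List String) (out : Bool) : Decidable (Spec_has_syntax_issue entries_subset out) := by unfold Spec_has_syntax_issue; infer_instance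

-- ===== CLAIM (what is proved, stated in full; the proofs are below) =====
def Claim_equal_has_syntax_issue : Prop := ∀ (entries_subset : List String), Dom_has_syntax_issue entries_subset → Spec_has_syntax_issue entries_subset (has_syntax_issue entries_subset)

-- ===== LEMMAS AND PROOFS =====

-- A's fold started inside a string with quote q: if the inner scan fails, in_str stays true;
-- if it returns r, the fold over l equals the fold restarted outside the string on r.
theorem pvFold_inStr (q : Char) : ∀ (l : List Char) (depth : Int),
    (match pvScanStr q l with
     | none => (l.foldl pvStepA (depth, true, some q, false)).2.1 = true
     | some r => l.foldl pvStepA (depth, true, some q, false) = r.foldl pvStepA (depth, false, some q, false)) := by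
  intro l
  induction l using pvScanStr.induct q with
  | case1 => intro depth; simp [pvScanStr, List.foldl]
  | case2 =>
    intro depth
    simp [pvScanStr, List.foldl, pvStepA]
  | case3 head rr ih =>
    intro depth
    simp only [pvScanStr, if_pos]
    have := ih depth
    simpa [List.foldl, pvStepA] using this
  | case4 rest hq =>
    intro depth
    rw [pvScanStr.eq_def]
    simp [hq, List.foldl, pvStepA]
  | case5 c rest hc hq ih =>
    intro depth
    rw [pvScanStr.eq_def]
    simp only [if_neg hc, if_neg hq]
    have := ih depth
    simpa [List.foldl, pvStepA, hc, hq] using this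

-- main correspondence: B's outer loop equals the verdict of A's fold started outside a string
theorem pvMain (l : List Char) (depth : Int) : ∀ (sc : Option Char),
    pvOuter l depth =
      (let st := l.foldl pvStepA (depth, false, sc, false)
       decide (st.1 ≠ 0) || st.2.1) := by
  induction l, depth using pvOuter.induct with
  | case1 depth => intro sc; simp [pvOuter, List.foldl]
  | case2 rest depth ih =>
    intro sc
    match rest with
    | [] => simp [pvOuter, List.foldl, pvStepA]
    | x :: r =>
      simp only [List.drop_one, List.tail_cons] at ih
      simp only [pvOuter, List.drop_one, List.tail_cons, if_pos]
      rw [ih sc]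
      simp [List.foldl, pvStepA]
  | case3 ch rest depth hc hq hscan =>
    intro sc
    have := pvFold_inStr ch rest depth
    rw [hscan] at this
    simp only [pvOuter, if_neg hc, if_pos hq]
    split
    · simp [List.foldl, pvStepA, hc, hq, this]
    · next r' heq => rw [hscan] at heq; cases heq
  | case4 ch rest depth hc hq r hscan ih =>
    intro sc
    have := pvFold_inStr ch rest depth
    rw [hscan] at this
    simp only [pvOuter, if_neg hc, if_pos hq]
    split
    · next heq => rw [hscan] at heq; cases heq
    · next r' heq =>
        rw [hscan] at heq
        cases heq
        rw [ih (some ch)]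
        simp [List.foldl, pvStepA, hc, hq, this]
  | case5 rest depth h1 h2 ih =>
    intro sc
    simp only [pvOuter, if_neg h1, if_neg h2, if_pos]
    rw [ih sc]
    simp [List.foldl, pvStepA]
  | case6 rest depth h1 h2 h3 ih =>
    intro sc
    simp only [pvOuter, if_neg h1, if_neg h2, if_neg h3, if_pos]
    rw [ih sc]
    simp [List.foldl, pvStepA]
  | case7 ch rest depth hc hq h3 h4 ih =>
    intro sc
    simp only [pvOuter, if_neg hc, if_neg hq, if_neg h3, if_neg h4]
    rw [ih sc]
    simp [List.foldl, pvStepA, hc, hq, h3, h4]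

-- ===== VERDICT (by name: the statement is the Claim_ definition above) =====
theorem has_syntax_issue_spec : Claim_equal_has_syntax_issue := by
  intro entries _
  unfold Spec_has_syntax_issue has_syntax_issue has_syntax_issue_alt
  rw [pvMain]
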